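-- pv_equiv track=rewrite | github.com/varnika-98/AeroOps-POC | app/pages/4_Data_Lineage.py | _sankey_link_colors
-- ===== SOURCE A (Python) =====
-- _BRONZE_COLOR = "#cd7f32"
--
-- _SILVER_COLOR = "#8a9bae"
--
-- _GOLD_COLOR = "#d4af37"
--
-- def _sankey_node_colors(labels: list[str]) -> list[str]:
--     colors = []
--     for lbl in labels:
--         if lbl.startswith("Bronze"):
--             colors.append(_BRONZE_COLOR)
--         elif lbl.startswith("Silver"):
--             colors.append(_SILVER_COLOR)
--         elif lbl.startswith("Gold"):
--             colors.append(_GOLD_COLOR)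
--         else:
--             colors.append("#4682B4")
--     return colors
--
-- def _sankey_link_colors(sources: list[int], labels: list[str]) -> list[str]:
--     nc = _sankey_node_colors(labels)
--     colors = []
--     for s in sources:
--         base = nc[s]
--         r, g, b = int(base[1:3], 16), int(base[3:5], 16), int(base[5:7], 16)
--         colors.append(f"rgba({r},{g},{b},0.35)")
--     return colors
-- ===== SOURCE B (Python) =====
-- _RGBA_BY_PREFIX = {
--     "Bronze": "rgba(205,127,50,0.35)",
--     "Silver": "rgba(138,155,174,0.35)",
--     "Gold": "rgba(212,175,55,0.35)",
-- }
-- _DEFAULT_RGBA = "rgba(70,130,180,0.35)"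
--
--
-- def _sankey_link_colors(sources: list[int], labels: list[str]) -> list[str]:
--     # Single pass over sources: classify labels[s] directly to a precomputed
--     # rgba constant -- no intermediate node-color list, no hex parsing at all.
--     out = []
--     for s in sources:
--         lbl = labels[s]
--         for prefix, rgba in _RGBA_BY_PREFIX.items():
--             if lbl.startswith(prefix):
--                 out.append(rgba)
--                 break
--         else:
--             out.append(_DEFAULT_RGBA)
--     return out
-- ===== Notes on version B (the rewrite author's own statement) =====
-- stated objective: alternative
-- what changed: B drops A's intermediate node-color list and all hex parsing: it is a single pass over sources that classifies labels[s] directly against a constant prefix->rgba table of four precomputed rgba string literals, whereas A first builds a per-label hex list and then parses and formats hex digits for every link.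
import Mathlib
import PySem

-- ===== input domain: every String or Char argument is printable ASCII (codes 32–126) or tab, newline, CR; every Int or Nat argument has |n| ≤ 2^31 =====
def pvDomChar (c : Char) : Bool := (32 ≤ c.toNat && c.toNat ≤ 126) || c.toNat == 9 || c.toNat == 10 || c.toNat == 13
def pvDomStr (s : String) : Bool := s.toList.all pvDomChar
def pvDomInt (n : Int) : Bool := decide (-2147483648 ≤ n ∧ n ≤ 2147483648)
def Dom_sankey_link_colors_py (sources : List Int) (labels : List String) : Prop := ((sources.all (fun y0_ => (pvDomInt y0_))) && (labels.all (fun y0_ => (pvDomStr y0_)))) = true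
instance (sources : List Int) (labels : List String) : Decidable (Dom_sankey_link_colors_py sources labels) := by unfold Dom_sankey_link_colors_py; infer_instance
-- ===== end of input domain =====

-- B replaces A's node-color list and per-link hex parsing by one pass over sources that classifies labels[s] against a constant prefix→rgba table (objective: alternative).

-- ===== PORT A =====
-- _sankey_node_colors: loop appending one hex color per label
def pvNodeColorsA (labels : List String) : List String :=
  labels.foldl (fun colors lbl =>
    if PySem.Str.startswith lbl "Bronze" then colors ++ ["#cd7f32"]
    else if PySem.Str.startswith lbl "Silver" then colors ++ ["#8a9bae"]
    else if PySem.Str.startswith lbl "Gold" then colors ++ ["#d4af37"]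
    else colors ++ ["#4682B4"]) []

-- per-link body of A's loop: base = nc[s]; parse the three hex pairs; format the f-string
-- (f"rgba({r},{g},{b},0.35)" built by hand on List Char — exact for str(int) concatenation)
def pvLinkColorA (nc : List String) (s : Int) : String :=
  let base := PySem.List.pyGetD nc s ""   -- nc[s]; Pre_ excludes the IndexError case
  let r := (PySem.Int.ofStrBase? (PySem.Str.slice base (some 1) (some 3)) 16).getD 0
  let g := (PySem.Int.ofStrBase? (PySem.Str.slice base (some 3) (some 5)) 16).getD 0
  let b := (PySem.Int.ofStrBase? (PySem.Str.slice base (some 5) (some 7)) 16).getD 0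
  String.ofList ("rgba(".toList ++ PySem.Int.toChars r ++ ",".toList ++ PySem.Int.toChars g
    ++ ",".toList ++ PySem.Int.toChars b ++ ",0.35)".toList)

def sankey_link_colors_py (sources : List Int) (labels : List String) : List String :=
  let nc := pvNodeColorsA labels
  sources.foldl (fun colors s => colors ++ [pvLinkColorA nc s]) []

-- ===== PORT B =====
-- the constant module-level dict _RGBA_BY_PREFIX, as an association list in insertion order
def pvRgbaByPrefix : List (String × String) :=
  [("Bronze", "rgba(205,127,50,0.35)"),
   ("Silver", "rgba(138,155,174,0.35)"),
   ("Gold", "rgba(212,175,55,0.35)")]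

-- body of B's loop: lbl = labels[s]; inner for/else over the dict items
def pvLinkColorB (labels : List String) (s : Int) : String :=
  let lbl := PySem.List.pyGetD labels s ""   -- labels[s]; Pre_ excludes the IndexError case
  match pvRgbaByPrefix.find? (fun p => PySem.Str.startswith lbl p.1) with
  | some p => p.2
  | none => "rgba(70,130,180,0.35)"

def sankey_link_colors_py_alt (sources : List Int) (labels : List String) : List String :=
  sources.foldl (fun out s => out ++ [pvLinkColorB labels s]) []

-- ===== PRECONDITION & SPEC =====
-- Pre_ excludes exactly the inputs where Python A raises IndexError on nc[s] (a source index out of range).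
def Pre_sankey_link_colors_py (sources : List Int) (labels : List String) : Prop :=
  ∀ s ∈ sources, PySem.Raise.InRange labels.length s
instance (sources : List Int) (labels : List String) : Decidable (Pre_sankey_link_colors_py sources labels) := by unfold Pre_sankey_link_colors_py; infer_instance

def pvWitness_sankey_link_colors_py : List Int × List String := ([0, -1, 2], ["Bronze", "Gold", "x"])

def Spec_sankey_link_colors_py (sources : List Int) (labels : List String) (out : List String) : Prop := out = sankey_link_colors_py_alt sources labels
instance (sources : List Int) (labels : List String) (out : List String) : Decidable (Spec_sankey_link_colors_py sources labels out) := by unfold Spec_sankey_link_colors_py; infer_instance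

-- ===== CLAIM (what is proved, stated in full; the proofs are below) =====
def Claim_equal_sankey_link_colors_py : Prop := ∀ (sources : List Int) (labels : List String), Dom_sankey_link_colors_py sources labels → Pre_sankey_link_colors_py sources labels → Spec_sankey_link_colors_py sources labels (sankey_link_colors_py sources labels)

-- ===== LEMMAS AND PROOFS =====

-- indexing a mapped list, under the same in-range condition, with any defaults
theorem pvGetD_map_inRange (f : String → String) (l : List String) (i : Int) (d d' : String)
    (h : PySem.Raise.InRange l.length i) :
    PySem.List.pyGetD (l.map f) i d' = f (PySem.List.pyGetD l i d) := by
  unfold PySem.Raise.InRange at h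
  rcases Int.lt_or_le i 0 with hi | hi
  case inr =>
    rw [PySem.List.pyGetD_eq_getElem _ d' hi (by simpa using h.2),
        PySem.List.pyGetD_eq_getElem _ d hi h.2]
    simp
  case inl =>
    obtain ⟨k, hk1, hk2, rfl⟩ : ∃ k : Nat, 0 < k ∧ k ≤ l.length ∧ i = -(k : Int) :=
      ⟨i.natAbs, by omega, by omega, by omega⟩
    rw [PySem.List.pyGetD_neg_natCast _ k d' hk1 (by simpa using hk2),
        PySem.List.pyGetD_neg_natCast _ k d hk1 hk2]
    simp

-- A's per-label classification, as a function
def pvClassify (lbl : String) : String :=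
  if PySem.Str.startswith lbl "Bronze" then "#cd7f32"
  else if PySem.Str.startswith lbl "Silver" then "#8a9bae"
  else if PySem.Str.startswith lbl "Gold" then "#d4af37"
  else "#4682B4"

theorem pvNodeColorsA_eq_map (labels : List String) :
    pvNodeColorsA labels = labels.map pvClassify := by
  unfold pvNodeColorsA pvClassify
  rw [show (fun (colors : List String) (lbl : String) =>
      if PySem.Str.startswith lbl "Bronze" then colors ++ ["#cd7f32"]
      else if PySem.Str.startswith lbl "Silver" then colors ++ ["#8a9bae"]
      else if PySem.Str.startswith lbl "Gold" then colors ++ ["#d4af37"]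
      else colors ++ ["#4682B4"]) = (fun colors lbl =>
        colors ++ [if PySem.Str.startswith lbl "Bronze" then "#cd7f32"
          else if PySem.Str.startswith lbl "Silver" then "#8a9bae"
          else if PySem.Str.startswith lbl "Gold" then "#d4af37"
          else "#4682B4"]) from by
    funext colors lbl; split_ifs <;> rfl]
  simpa using PySem.List.foldl_append_singleton_eq_map _ labels []

-- A's hex-parse-and-format step as a function of the base color alone
def pvHexFmt (base : String) : String :=
  let r := (PySem.Int.ofStrBase? (PySem.Str.slice base (some 1) (some 3)) 16).getD 0
  let g := (PySem.Int.ofStrBase? (PySem.Str.slice base (some 3) (some 5)) 16).getD 0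
  let b := (PySem.Int.ofStrBase? (PySem.Str.slice base (some 5) (some 7)) 16).getD 0
  String.ofList ("rgba(".toList ++ PySem.Int.toChars r ++ ",".toList ++ PySem.Int.toChars g
    ++ ",".toList ++ PySem.Int.toChars b ++ ",0.35)".toList)

theorem pvLinkColorA_eq (nc : List String) (s : Int) :
    pvLinkColorA nc s = pvHexFmt (PySem.List.pyGetD nc s "") := rfl

-- B's per-link classification agrees with A's classify-then-parse on every label
theorem pvLinkB_eq_fmt_classify (lbl : String) :
    (match pvRgbaByPrefix.find? (fun p => PySem.Str.startswith lbl p.1) with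
      | some p => p.2
      | none => "rgba(70,130,180,0.35)") = pvHexFmt (pvClassify lbl) := by
  unfold pvRgbaByPrefix pvClassify
  simp only [List.find?]
  cases hB : PySem.Str.startswith lbl "Bronze" <;>
    cases hS : PySem.Str.startswith lbl "Silver" <;>
      cases hG : PySem.Str.startswith lbl "Gold" <;>
        simp only [hB, hS, hG] <;> decide

-- ===== VERDICT (by name: the statement is the Claim_ definition above) =====
theorem sankey_link_colors_py_spec : Claim_equal_sankey_link_colors_py := by
  intro sources labels _ hpre
  unfold Spec_sankey_link_colors_py sankey_link_colors_py sankey_link_colors_py_alt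
  rw [PySem.List.foldl_append_singleton_eq_map (pvLinkColorA (pvNodeColorsA labels)) sources [],
      PySem.List.foldl_append_singleton_eq_map (pvLinkColorB labels) sources []]
  simp only [List.nil_append]
  apply List.map_congr_left
  intro s hs
  rw [pvLinkColorA_eq, pvNodeColorsA_eq_map,
      pvGetD_map_inRange pvClassify labels s "" "" (hpre s hs)]
  unfold pvLinkColorB
  rw [pvLinkB_eq_fmt_classify]
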